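-- pv_equiv track=rewrite | github.com/Mirabellensaft/SVGtoCSS | svgTOcss.py | set_zero_factor
-- ===== SOURCE A (Python) =====
-- def set_zero_factor(raw_coordinates_list):
--     """Finds the smalles x- and y-value for
--        setting them zero. Returns a tuple"""
--
--     x_min = 1000
--     y_min = 1000
--
--     for i in range(len(raw_coordinates_list)):
--         # find max
--         if i%2 == 0:
--             if raw_coordinates_list[i] < x_min:
--                 x_min = raw_coordinates_list[i]
--         else:
--             if raw_coordinates_list[i] < y_min:
--                 y_min = raw_coordinates_list[i]
--
--     print ("x_min", x_min)
--     print ("y_min", y_min)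
--
--     min_values = (x_min, y_min)
--
--     return min_values
-- ===== SOURCE B (Python) =====
-- def set_zero_factor(raw_coordinates_list):
--     """Finds the smalles x- and y-value for
--        setting them zero. Returns a tuple"""
--
--     x_vals = raw_coordinates_list[0::2]
--     y_vals = raw_coordinates_list[1::2]
--
--     x_min = min(x_vals + [1000])
--     y_min = min(y_vals + [1000])
--
--     print ("x_min", x_min)
--     print ("y_min", y_min)
--
--     return (x_min, y_min)
-- ===== Notes on version B (the rewrite author's own statement) =====
-- stated objective: simpler
-- what changed: Replaced the single index loop with an interleaved parity branch by slicing the list into even- and odd-indexed sublists and taking min over each with the 1000 sentinel appended as the floor.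
import Mathlib
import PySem

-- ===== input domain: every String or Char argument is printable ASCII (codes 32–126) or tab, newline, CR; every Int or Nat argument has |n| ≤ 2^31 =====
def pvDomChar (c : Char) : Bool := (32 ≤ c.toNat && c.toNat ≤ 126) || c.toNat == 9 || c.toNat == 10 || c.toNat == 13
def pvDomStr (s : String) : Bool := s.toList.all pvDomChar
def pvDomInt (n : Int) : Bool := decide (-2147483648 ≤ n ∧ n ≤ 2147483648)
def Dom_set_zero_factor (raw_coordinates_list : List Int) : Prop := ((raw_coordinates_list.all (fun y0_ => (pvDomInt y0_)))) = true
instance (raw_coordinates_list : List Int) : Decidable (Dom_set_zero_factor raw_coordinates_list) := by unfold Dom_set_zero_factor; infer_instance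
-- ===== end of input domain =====

-- B replaces A's single interleaved parity-branching index loop by slicing the list into the
-- even- and odd-indexed sublists and taking min over each with the 1000 sentinel appended
-- (objective: simpler). Equivalence is about the RETURN value; both Pythons also print the
-- same two lines ("x_min", "y_min"), a side effect not modelled here.

-- ===== PORT A =====
def set_zero_factor (raw_coordinates_list : List Int) : Int × Int :=
  -- x_min = 1000; y_min = 1000; for i in range(len(...)): parity branch; return (x_min, y_min)
  (PySem.List.pyRange 0 (PySem.List.len raw_coordinates_list) 1).foldl
    (fun st i =>
      if PySem.Int.mod i 2 == 0 then
        if PySem.List.pyGetD raw_coordinates_list i 0 < st.1 then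
          (PySem.List.pyGetD raw_coordinates_list i 0, st.2)
        else st
      else
        if PySem.List.pyGetD raw_coordinates_list i 0 < st.2 then
          (st.1, PySem.List.pyGetD raw_coordinates_list i 0)
        else st)
    (1000, 1000)

-- ===== PORT B =====
def set_zero_factor_alt (raw_coordinates_list : List Int) : Int × Int :=
  let x_vals := (PySem.List.slice? raw_coordinates_list (some 0) none 2).getD []   -- l[0::2]
  let y_vals := (PySem.List.slice? raw_coordinates_list (some 1) none 2).getD []   -- l[1::2]
  let x_min := (PySem.List.min? (x_vals ++ [1000]) (fun v => v)).getD 1000          -- min(x_vals + [1000])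
  let y_min := (PySem.List.min? (y_vals ++ [1000]) (fun v => v)).getD 1000          -- min(y_vals + [1000])
  (x_min, y_min)

-- ===== PRECONDITION & SPEC =====
def Spec_set_zero_factor (raw_coordinates_list : List Int) (out : Int × Int) : Prop := out = set_zero_factor_alt raw_coordinates_list
instance (raw_coordinates_list : List Int) (out : Int × Int) : Decidable (Spec_set_zero_factor raw_coordinates_list out) := by unfold Spec_set_zero_factor; infer_instance

-- ===== CLAIM (what is proved, stated in full; the proofs are below) =====
def Claim_equal_set_zero_factor : Prop := ∀ (raw_coordinates_list : List Int), Dom_set_zero_factor raw_coordinates_list → Spec_set_zero_factor raw_coordinates_list (set_zero_factor raw_coordinates_list)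

-- ===== LEMMAS AND PROOFS =====

-- even-indexed elements of a list
def pvEvens : List Int → List Int
  | [] => []
  | [x] => [x]
  | x :: _ :: t => x :: pvEvens t

theorem pvEvens_cons (x : Int) (t : List Int) : pvEvens (x :: t) = x :: pvEvens t.tail := by
  cases t <;> rfl

theorem pvFilterMap_range_succ_shift {β : Type} (f g : Nat → Option β) (x : β) (c : Nat)
    (h0 : f 0 = some x) (hs : ∀ k, f (k + 1) = g k) :
    List.filterMap f (List.range (c + 1)) = x :: List.filterMap g (List.range c) := by
  rw [List.range_succ_eq_map, List.filterMap_cons, h0, List.filterMap_map]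
  show x :: List.filterMap (f ∘ Nat.succ) (List.range c) = _
  congr 1
  exact List.filterMap_congr (fun k _ => hs k)

theorem pvFilterMapEvens : ∀ (l : List Int),
    List.filterMap (fun k => l[2 * k]?) (List.range ((l.length + 1) / 2)) = pvEvens l := by
  intro l
  induction l using pvEvens.induct with
  | case1 => simp [pvEvens]
  | case2 x => simp [pvEvens]
  | case3 x y t ih =>
    have hc : ((x :: y :: t).length + 1) / 2 = (t.length + 1) / 2 + 1 := by
      simp only [List.length_cons]; omega
    rw [hc, pvFilterMap_range_succ_shift (x := x) (g := fun k => t[2 * k]?)]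
    · rw [ih]; rfl
    · rfl
    · intro k
      have : 2 * (k + 1) = (2 * k) + 1 + 1 := by omega
      simp [this]

theorem pvFilterMapOdds : ∀ (l : List Int),
    List.filterMap (fun k => l[1 + 2 * k]?) (List.range (l.length / 2)) = pvEvens l.tail := by
  intro l
  cases l with
  | nil => simp [pvEvens]
  | cons x t =>
    have hc : (x :: t).length / 2 = (t.length + 1) / 2 := by
      simp only [List.length_cons]
    rw [hc]
    have : ∀ k, (x :: t)[1 + 2 * k]? = t[2 * k]? := by
      intro k
      have h1 : 1 + 2 * k = (2 * k) + 1 := by omega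
      simp [h1]
    calc List.filterMap (fun k => (x :: t)[1 + 2 * k]?) (List.range ((t.length + 1) / 2))
        = List.filterMap (fun k => t[2 * k]?) (List.range ((t.length + 1) / 2)) :=
          List.filterMap_congr (fun k _ => this k)
      _ = pvEvens t := pvFilterMapEvens t

theorem pvSlice0 (l : List Int) :
    PySem.List.slice? l (some 0) none 2 = some (pvEvens l) := by
  rw [← pvFilterMapEvens l]
  simp only [PySem.List.slice?, PySem.List.sliceIndices]
  norm_num
  have hcount : (if 0 < l.length then (((l.length : Int) + 2 - 1) / 2).toNat else 0)
      = (l.length + 1) / 2 := by split_ifs <;> omega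
  rw [hcount]
  refine List.filterMap_congr (fun k _ => ?_)
  have h2 : (2 * (k : Int)).toNat = 2 * k := by omega
  rw [h2]

theorem pvSlice1 (l : List Int) :
    PySem.List.slice? l (some 1) none 2 = some (pvEvens l.tail) := by
  rw [← pvFilterMapOdds l]
  simp only [PySem.List.slice?, PySem.List.sliceIndices]
  norm_num
  have hcount : (if 1 < l.length
        then (((l.length : Int) - min 1 (l.length : Int) + 2 - 1) / 2).toNat else 0)
      = l.length / 2 := by split_ifs <;> omega
  rw [hcount]
  refine List.filterMap_congr (fun k hk => ?_)
  have hk' : k < l.length / 2 := List.mem_range.mp hk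
  have h2 : (min 1 ((l.length : Int)) + 2 * (k : Int)).toNat = 1 + 2 * k := by omega
  rw [h2]

theorem pvFoldlMin_min (t : List Int) : ∀ (a b : Int),
    min b (t.foldl min a) = t.foldl min (min b a) := by
  induction t with
  | nil => intro a b; rfl
  | cons c t ih =>
    intro a b
    simp only [List.foldl_cons]
    rw [ih, min_assoc]

theorem pvMinGet (xs : List Int) :
    (PySem.List.min? (xs ++ [1000]) (fun v => v)).getD 1000 = xs.foldl min 1000 := by
  cases xs with
  | nil => decide
  | cons v t =>
    rw [List.cons_append, PySem.List.min?_id_cons, Option.getD_some, List.foldl_append]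
    simp only [List.foldl_cons, List.foldl_nil]
    rw [min_comm, pvFoldlMin_min]

-- A's loop over enumerated indices
theorem pvEnumFold (l : List Int) : ∀ (s a b : Int),
    (PySem.List.enumerate l s).foldl
      (fun st p =>
        if PySem.Int.mod p.1 2 == 0 then
          if p.2 < st.1 then (p.2, st.2) else st
        else
          if p.2 < st.2 then (st.1, p.2) else st) (a, b)
    = if PySem.Int.mod s 2 = 0 then
        ((pvEvens l).foldl min a, (pvEvens l.tail).foldl min b)
      else
        ((pvEvens l.tail).foldl min a, (pvEvens l).foldl min b) := by
  induction l with
  | nil =>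
    intro s a b
    simp [PySem.List.enumerate, pvEvens]
  | cons x t ih =>
    intro s a b
    have hmod : PySem.Int.mod s 2 = s % 2 := PySem.Int.mod_eq_emod_of_pos (by norm_num)
    have hmod1 : PySem.Int.mod (s + 1) 2 = (s + 1) % 2 := PySem.Int.mod_eq_emod_of_pos (by norm_num)
    rw [PySem.List.enumerate_cons, List.foldl_cons]
    by_cases h : s % 2 = 0
    · have h1 : ¬ (s + 1) % 2 = 0 := by omega
      have hstep : (if PySem.Int.mod s 2 == 0 then
            (if x < a then (x, b) else (a, b))
          else (if x < b then (a, x) else (a, b))) = ((min a x, b) : Int × Int) := by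
        simp only [hmod, h]
        norm_num [min_def]
        split_ifs <;> first | rfl | omega
      simp only [hstep]
      rw [ih]
      rw [hmod1, if_neg h1, hmod, if_pos h, pvEvens_cons]
      simp [List.foldl_cons]
    · have h1 : (s + 1) % 2 = 0 := by omega
      have hstep : (if PySem.Int.mod s 2 == 0 then
            (if x < a then (x, b) else (a, b))
          else (if x < b then (a, x) else (a, b))) = ((a, min b x) : Int × Int) := by
        simp only [hmod]
        norm_num [h, min_def]
        split_ifs <;> first | rfl | omega
      simp only [hstep]
      rw [ih]
      rw [hmod1, if_pos h1, hmod, if_neg h, pvEvens_cons]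
      simp [List.foldl_cons]

-- ===== VERDICT (by name: the statement is the Claim_ definition above) =====
theorem set_zero_factor_spec : Claim_equal_set_zero_factor := by
  intro l _
  unfold Spec_set_zero_factor set_zero_factor set_zero_factor_alt
  rw [pvSlice0, pvSlice1]
  simp only [Option.getD_some]
  rw [pvMinGet, pvMinGet]
  have henum := PySem.List.enumerate_eq_map_pyRange (xs := l) (d := 0)
  have hfold := pvEnumFold l 0 1000 1000
  rw [henum, List.foldl_map] at hfold
  rw [show PySem.Int.mod 0 2 = 0 from rfl, if_pos rfl] at hfold
  exact hfold
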